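-- pv_equiv track=rewrite | github.com/dancc7t/SAISOD | src/figurehelper.py | get_det_count_by_size
-- ===== SOURCE A (Python) =====
-- def get_det_count_by_size(ann_list):
--   small_count = 0
--   medium_count = 0
--   large_count = 0
--   for ann in ann_list:
--     area = ann['area']
--     if area <= 32**2:
--       small_count += 1
--     elif area <= 96**2:
--       medium_count += 1
--     else:
--       large_count += 1
--
--   return small_count, medium_count, large_count
-- ===== SOURCE B (Python) =====
-- def get_det_count_by_size(ann_list):
--   small = sum(1 for ann in ann_list if ann['area'] <= 32**2)
--   medium = sum(1 for ann in ann_list if 32**2 < ann['area'] <= 96**2)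
--   large = sum(1 for ann in ann_list if ann['area'] > 96**2)
--   return small, medium, large
-- ===== Notes on version B (the rewrite author's own statement) =====
-- stated objective: alternative
-- what changed: Replaces A's single accumulating loop with an if/elif chain by three independent counting passes, one per size bucket, each a branch-free sum over a range predicate.
import Mathlib
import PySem

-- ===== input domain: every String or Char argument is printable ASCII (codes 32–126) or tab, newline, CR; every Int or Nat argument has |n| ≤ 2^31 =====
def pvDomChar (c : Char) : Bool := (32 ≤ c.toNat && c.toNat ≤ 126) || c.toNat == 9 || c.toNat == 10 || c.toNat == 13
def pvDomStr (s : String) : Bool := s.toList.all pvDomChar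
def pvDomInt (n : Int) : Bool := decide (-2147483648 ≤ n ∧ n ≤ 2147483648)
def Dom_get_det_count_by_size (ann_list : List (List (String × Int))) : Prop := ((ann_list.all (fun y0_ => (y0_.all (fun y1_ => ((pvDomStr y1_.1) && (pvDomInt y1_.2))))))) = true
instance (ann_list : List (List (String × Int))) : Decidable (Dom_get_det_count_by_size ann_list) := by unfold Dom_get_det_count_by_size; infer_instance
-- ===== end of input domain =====

-- B replaces A's single accumulating loop (if/elif chain) by three independent
-- counting passes, one per size bucket; objective: alternative decomposition.

-- ===== PORT A =====
-- ann['area'] : first matching key in the association list (dict lookup); none = KeyError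
def pvAreaA (ann : List (String × Int)) : Option Int :=
  (ann.find? (fun p => p.1 == "area")).map (·.2)

def get_det_count_by_size (ann_list : List (List (String × Int))) : Int × Int × Int :=
  ann_list.foldl
    (fun (s : Int × Int × Int) ann =>
      let area := (pvAreaA ann).getD 0   -- Pre_ guarantees the key exists (Python: KeyError otherwise)
      if area ≤ 32 ^ 2 then (s.1 + 1, s.2.1, s.2.2)
      else if area ≤ 96 ^ 2 then (s.1, s.2.1 + 1, s.2.2)
      else (s.1, s.2.1, s.2.2 + 1))
    (0, 0, 0)

-- ===== PORT B =====
def pvAreaB (ann : List (String × Int)) : Int :=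
  ((ann.find? (fun p => p.1 == "area")).map (·.2)).getD 0   -- Pre_ guarantees the key exists

def get_det_count_by_size_alt (ann_list : List (List (String × Int))) : Int × Int × Int :=
  let small : Int := ann_list.countP (fun ann => pvAreaB ann ≤ 32 ^ 2)
  let medium : Int := ann_list.countP (fun ann => 32 ^ 2 < pvAreaB ann && pvAreaB ann ≤ 96 ^ 2)
  let large : Int := ann_list.countP (fun ann => 96 ^ 2 < pvAreaB ann)
  (small, medium, large)

-- ===== PRECONDITION & SPEC =====
-- Pre_ excludes annotations lacking the 'area' key, on which Python A raises KeyError.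
def Pre_get_det_count_by_size (ann_list : List (List (String × Int))) : Prop :=
  (ann_list.all (fun ann => ann.any (fun p => p.1 == "area"))) = true
instance (ann_list : List (List (String × Int))) : Decidable (Pre_get_det_count_by_size ann_list) := by unfold Pre_get_det_count_by_size; infer_instance

def pvWitness_get_det_count_by_size : (List (List (String × Int))) :=
  [[("area", 100)], [("area", 5000), ("id", 1)], [("area", 20000)]]

def Spec_get_det_count_by_size (ann_list : List (List (String × Int))) (out : Int × Int × Int) : Prop := out = get_det_count_by_size_alt ann_list
instance (ann_list : List (List (String × Int))) (out : Int × Int × Int) : Decidable (Spec_get_det_count_by_size ann_list out) := by unfold Spec_get_det_count_by_size; infer_instance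

-- ===== CLAIM (what is proved, stated in full; the proofs are below) =====
def Claim_equal_get_det_count_by_size : Prop := ∀ (ann_list : List (List (String × Int))), Dom_get_det_count_by_size ann_list → Pre_get_det_count_by_size ann_list → Spec_get_det_count_by_size ann_list (get_det_count_by_size ann_list)

-- ===== LEMMAS AND PROOFS =====
lemma foldA_counts (l : List (List (String × Int))) (a b c : Int) :
    l.foldl
      (fun (s : Int × Int × Int) ann =>
        let area := (pvAreaA ann).getD 0
        if area ≤ 32 ^ 2 then (s.1 + 1, s.2.1, s.2.2)
        else if area ≤ 96 ^ 2 then (s.1, s.2.1 + 1, s.2.2)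
        else (s.1, s.2.1, s.2.2 + 1))
      (a, b, c)
    = (a + (l.countP (fun ann => pvAreaB ann ≤ 32 ^ 2) : Int),
       b + (l.countP (fun ann => 32 ^ 2 < pvAreaB ann && pvAreaB ann ≤ 96 ^ 2) : Int),
       c + (l.countP (fun ann => 96 ^ 2 < pvAreaB ann) : Int)) := by
  induction l generalizing a b c with
  | nil => simp
  | cons ann rest ih =>
    have hab : (pvAreaA ann).getD 0 = pvAreaB ann := rfl
    simp only [List.foldl_cons, List.countP_cons, hab]
    by_cases h1 : pvAreaB ann ≤ 32 ^ 2
    · have e2 : (decide (32 ^ 2 < pvAreaB ann) && decide (pvAreaB ann ≤ 96 ^ 2)) = false := by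
        simp; omega
      have e3 : decide (96 ^ 2 < pvAreaB ann) = false := by simp; omega
      rw [if_pos h1, e2, e3, decide_eq_true h1]
      simp only [if_true, Bool.false_eq_true, if_false, ih]
      simp only [Prod.mk.injEq]
      push_cast
      refine ⟨by ring, by ring, by ring⟩
    · by_cases h2 : pvAreaB ann ≤ 96 ^ 2
      · have e1 : decide (pvAreaB ann ≤ 32 ^ 2) = false := by simp; omega
        have e2 : (decide (32 ^ 2 < pvAreaB ann) && decide (pvAreaB ann ≤ 96 ^ 2)) = true := by
          simp; omega
        have e3 : decide (96 ^ 2 < pvAreaB ann) = false := by simp; omega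
        rw [if_neg h1, if_pos h2, e1, e2, e3]
        simp only [if_true, Bool.false_eq_true, if_false, ih]
        simp only [Prod.mk.injEq]
        push_cast
        refine ⟨by ring, by ring, by ring⟩
      · have e1 : decide (pvAreaB ann ≤ 32 ^ 2) = false := by simp; omega
        have e2 : (decide (32 ^ 2 < pvAreaB ann) && decide (pvAreaB ann ≤ 96 ^ 2)) = false := by
          simp; omega
        have e3 : decide (96 ^ 2 < pvAreaB ann) = true := by simp; omega
        rw [if_neg h1, if_neg h2, e1, e2, e3]
        simp only [if_true, Bool.false_eq_true, if_false, ih]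
        simp only [Prod.mk.injEq]
        push_cast
        refine ⟨by ring, by ring, by ring⟩

-- ===== VERDICT (by name: the statement is the Claim_ definition above) =====
theorem get_det_count_by_size_spec : Claim_equal_get_det_count_by_size := by
  intro l _ _
  show get_det_count_by_size l = get_det_count_by_size_alt l
  unfold get_det_count_by_size get_det_count_by_size_alt
  rw [foldA_counts]
  simp
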